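-- pv_equiv track=rewrite | github.com/urani-trade/solana-mev-literature | core/management/commands/populate.py | _get_computers_cleaned
-- ===== SOURCE A (Python) =====
-- def _get_computers_cleaned(computers):
--     '''
--         Handles computer names list.
--     '''
--     computers_cleaned_slash = set()
--     computers_cleaned_and = set()
--
--     for computer in computers:
--         if computer is not None:
--             computer_list = computer.split("/")
--             for comp in computer_list:
--                 if comp == 'IBM 20Q':
--                     comp = 'IBMQ20'
--                     computers_cleaned_slash.add(comp)
--                 if comp != '19Q-Acorn' and comp != '5' and comp != '2':
--                     computers_cleaned_slash.add(comp)
--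
--     for computer in computers_cleaned_slash:
--         computer_list = computer.split(" & ")
--         for comp in computer_list:
--             if comp == 'IBMQX2(4)':
--                 computers_cleaned_and.add('IBMQX2')
--                 computers_cleaned_and.add('IBMQX4')
--             else:
--                 computers_cleaned_and.add(comp)
--
--     return computers_cleaned_and
-- ===== SOURCE B (Python) =====
-- def _get_computers_cleaned(computers):
--     '''
--         Handles computer names list (single fused pass).
--     '''
--     result = set()
--     for computer in computers:
--         if computer is None:
--             continue
--         for token in computer.split("/"):
--             if token == 'IBM 20Q':
--                 token = 'IBMQ20'
--             elif token in ('19Q-Acorn', '5', '2'):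
--                 continue
--             for piece in token.split(" & "):
--                 if piece == 'IBMQX2(4)':
--                     result.add('IBMQX2')
--                     result.add('IBMQX4')
--                 else:
--                     result.add(piece)
--     return result
-- ===== Notes on version B (the rewrite author's own statement) =====
-- stated objective: simpler
-- what changed: B fuses A's two passes (build an intermediate slash-cleaned set, then re-scan it expanding ' & ' tokens) into one loop over the input that maps/filters each slash token and immediately expands it into the single result set, removing the intermediate set entirely.
import Mathlib
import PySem

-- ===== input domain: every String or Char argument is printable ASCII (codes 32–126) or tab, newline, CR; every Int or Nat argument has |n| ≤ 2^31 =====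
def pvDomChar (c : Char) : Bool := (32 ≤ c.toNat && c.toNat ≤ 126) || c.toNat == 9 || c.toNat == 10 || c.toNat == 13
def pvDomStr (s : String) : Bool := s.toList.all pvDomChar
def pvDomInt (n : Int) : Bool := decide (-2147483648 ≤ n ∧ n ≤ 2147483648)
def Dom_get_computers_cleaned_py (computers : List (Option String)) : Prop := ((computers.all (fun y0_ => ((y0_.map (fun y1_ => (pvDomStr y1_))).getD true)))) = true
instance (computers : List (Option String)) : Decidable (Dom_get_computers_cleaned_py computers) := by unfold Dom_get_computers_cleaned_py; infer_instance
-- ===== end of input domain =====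

-- B fuses A's two set-building passes into one loop over the input (no intermediate set); same result set, objective: simpler.


-- ===== PORT A =====
-- first pass, body of the inner 'for comp in computer_list' loop
def pvStepSlash (s : PySem.Set String) (comp : String) : PySem.Set String :=
  let p : String × PySem.Set String :=
    if comp = "IBM 20Q" then ("IBMQ20", PySem.Set.add s "IBMQ20") else (comp, s)
  if p.1 ≠ "19Q-Acorn" ∧ p.1 ≠ "5" ∧ p.1 ≠ "2" then PySem.Set.add p.2 p.1 else p.2

-- second pass, body of the inner 'for comp in computer_list' loop
def pvStepAnd (t : PySem.Set String) (comp : String) : PySem.Set String :=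
  if comp = "IBMQX2(4)" then PySem.Set.add (PySem.Set.add t "IBMQX2") "IBMQX4"
  else PySem.Set.add t comp

def get_computers_cleaned_py (computers : List (Option String)) : List String :=
  let slash : PySem.Set String :=
    computers.foldl (fun s computer =>
      match computer with
      | none => s
      | some c => ((PySem.Str.split? c "/").getD []).foldl pvStepSlash s) PySem.Set.empty
  slash.foldl (fun t computer =>
      ((PySem.Str.split? computer " & ").getD []).foldl pvStepAnd t) PySem.Set.empty

-- ===== PORT B =====
-- fused body: one slash token → map / filter, then expand its ' & ' pieces straight into the result
def pvStepFused (acc : PySem.Set String) (token : String) : PySem.Set String :=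
  let token := if token = "IBM 20Q" then "IBMQ20" else token
  if token = "19Q-Acorn" ∨ token = "5" ∨ token = "2" then acc
  else ((PySem.Str.split? token " & ").getD []).foldl (fun acc piece =>
    if piece = "IBMQX2(4)" then PySem.Set.add (PySem.Set.add acc "IBMQX2") "IBMQX4"
    else PySem.Set.add acc piece) acc

def get_computers_cleaned_py_alt (computers : List (Option String)) : List String :=
  computers.foldl (fun acc computer =>
    match computer with
    | none => acc
    | some c => ((PySem.Str.split? c "/").getD []).foldl pvStepFused acc) PySem.Set.empty

-- ===== PRECONDITION & SPEC =====
def Spec_get_computers_cleaned_py (computers : List (Option String)) (out : List String) : Prop := out = get_computers_cleaned_py_alt computers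
instance (computers : List (Option String)) (out : List String) : Decidable (Spec_get_computers_cleaned_py computers out) := by unfold Spec_get_computers_cleaned_py; infer_instance

-- ===== CLAIM (what is proved, stated in full; the proofs are below) =====
def Claim_equal_get_computers_cleaned_py : Prop := ∀ (computers : List (Option String)), Dom_get_computers_cleaned_py computers → Spec_get_computers_cleaned_py computers (get_computers_cleaned_py computers)

-- ===== LEMMAS AND PROOFS =====

-- abstract per-token functions
def pvTok1 (tok : String) : List String :=
  if tok = "IBM 20Q" then ["IBMQ20"]
  else if tok = "19Q-Acorn" ∨ tok = "5" ∨ tok = "2" then []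
  else [tok]

def pvH (comp : String) : List String :=
  ((PySem.Str.split? comp " & ").getD []).flatMap
    (fun p => if p = "IBMQX2(4)" then ["IBMQX2", "IBMQX4"] else [p])

def pvStream (computers : List (Option String)) : List String :=
  computers.flatMap (fun o =>
    match o with
    | none => []
    | some c => ((PySem.Str.split? c "/").getD []).flatMap pvTok1)

theorem pvUpdate_append (s : PySem.Set String) (a b : List String) :
    PySem.Set.update s (a ++ b) = PySem.Set.update (PySem.Set.update s a) b := by
  simp [PySem.Set.update, List.foldl_append]

theorem pvUpdate_of_subset (s : PySem.Set String) (l : List String)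
    (h : ∀ y ∈ l, y ∈ s) : PySem.Set.update s l = s := by
  induction l generalizing s with
  | nil => rfl
  | cons x l ih =>
      rw [PySem.Set.update_cons, PySem.Set.add_of_mem (h x (by simp))]
      exact ih s (fun y hy => h y (by simp [hy]))

-- A's slash-pass step is the update with pvTok1
theorem pvStepSlash_eq (s : PySem.Set String) (tok : String) :
    pvStepSlash s tok = PySem.Set.update s (pvTok1 tok) := by
  by_cases h : tok = "IBM 20Q"
  · subst h
    simp [pvStepSlash, pvTok1, PySem.Set.update_cons, PySem.Set.update_nil,
      PySem.Set.add_of_mem, PySem.Set.mem_add]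
  · by_cases h2 : tok = "19Q-Acorn" ∨ tok = "5" ∨ tok = "2"
    · simp [pvStepSlash, pvTok1, h, h2, PySem.Set.update_nil]
      rcases h2 with h2 | h2 | h2 <;> simp [h2]
    · rw [not_or, not_or] at h2
      simp [pvStepSlash, pvTok1, h, h2.1, h2.2.1, h2.2.2, PySem.Set.update_cons,
        PySem.Set.update_nil]

-- A's and-pass step is the update with pvH
theorem pvStepAndFold_eq (t : PySem.Set String) (comp : String) :
    ((PySem.Str.split? comp " & ").getD []).foldl pvStepAnd t = PySem.Set.update t (pvH comp) := by
  rw [pvH]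
  generalize (PySem.Str.split? comp " & ").getD [] = ps
  induction ps generalizing t with
  | nil => rfl
  | cons p ps ih =>
      simp only [List.foldl_cons, List.flatMap_cons, pvUpdate_append, ih]
      congr 1
      by_cases h : p = "IBMQX2(4)" <;>
        simp [pvStepAnd, h, PySem.Set.update_cons, PySem.Set.update_nil]

-- folding update-of-g over a list is update with the flatMap
theorem pvFoldl_update (g : α → List String) (l : List α) (s : PySem.Set String) :
    l.foldl (fun s a => PySem.Set.update s (g a)) s = PySem.Set.update s (l.flatMap g) := by
  induction l generalizing s with
  | nil => rfl
  | cons x l ih => simp [List.foldl_cons, ih, List.flatMap_cons, pvUpdate_append]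

-- A's first pass equals update with the token stream
theorem pvPassA_eq (computers : List (Option String)) (s : PySem.Set String) :
    computers.foldl (fun s computer =>
      match computer with
      | none => s
      | some c => ((PySem.Str.split? c "/").getD []).foldl pvStepSlash s) s
    = PySem.Set.update s (pvStream computers) := by
  induction computers generalizing s with
  | nil => rfl
  | cons o os ih =>
      cases o with
      | none => simpa [pvStream, List.flatMap_cons] using ih s
      | some c =>
          simp only [List.foldl_cons, pvStream, List.flatMap_cons, pvUpdate_append, ih]
          congr 1
          rw [show pvStepSlash = (fun s a => PySem.Set.update s (pvTok1 a)) from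
            funext fun s => funext fun a => pvStepSlash_eq s a]
          exact pvFoldl_update pvTok1 ((PySem.Str.split? c "/").getD []) s

-- B's fused step equals the update with the expanded tokens
theorem pvStepFused_eq (acc : PySem.Set String) (tok : String) :
    pvStepFused acc tok = PySem.Set.update acc ((pvTok1 tok).flatMap pvH) := by
  by_cases h : tok = "IBM 20Q"
  · subst h
    simp only [pvStepFused, pvTok1]
    rw [if_neg (by simp)]
    simpa using pvStepAndFold_eq acc "IBMQ20"
  · by_cases h2 : tok = "19Q-Acorn" ∨ tok = "5" ∨ tok = "2"
    · simp only [pvStepFused, pvTok1, if_neg h, if_pos h2]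
      rfl
    · simp only [pvStepFused, pvTok1, if_neg h, if_neg h2]
      simpa using pvStepAndFold_eq acc tok

-- B equals update with the fully expanded stream
theorem pvB_eq (computers : List (Option String)) :
    get_computers_cleaned_py_alt computers
      = PySem.Set.update PySem.Set.empty ((pvStream computers).flatMap pvH) := by
  unfold get_computers_cleaned_py_alt
  generalize (PySem.Set.empty : PySem.Set String) = s
  induction computers generalizing s with
  | nil => rfl
  | cons o os ih =>
      cases o with
      | none => simpa [pvStream, List.flatMap_cons] using ih s
      | some c =>
          simp only [List.foldl_cons, pvStream, List.flatMap_cons, pvUpdate_append,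
            List.flatMap_append, ih]
          congr 1
          have h1 := pvFoldl_update (fun t => (pvTok1 t).flatMap pvH)
            ((PySem.Str.split? c "/").getD []) s
          rw [show pvStepFused = (fun s a => PySem.Set.update s ((pvTok1 a).flatMap pvH)) from
            funext fun s => funext fun a => pvStepFused_eq s a]
          rw [show (((PySem.Str.split? c "/").getD []).flatMap pvTok1).flatMap pvH
              = ((PySem.Str.split? c "/").getD []).flatMap (fun t => (pvTok1 t).flatMap pvH) by
            simp [List.flatMap_assoc]]
          exact h1

-- KEY: expanding a deduplicated list updates the same as expanding the raw list
theorem pvKey (L : List String) (s t : PySem.Set String) :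
    PySem.Set.update t ((L.foldl PySem.Set.add s).flatMap pvH)
      = PySem.Set.update t ((s ++ L).flatMap pvH) := by
  induction L generalizing s with
  | nil => simp
  | cons x L ih =>
      by_cases hx : x ∈ s
      · rw [List.foldl_cons, PySem.Set.add_of_mem hx, ih s]
        have habs : ∀ y ∈ pvH x, y ∈ PySem.Set.update t (s.flatMap pvH) := by
          intro y hy
          rw [PySem.Set.mem_update]
          exact Or.inr (List.mem_flatMap.mpr ⟨x, hx, hy⟩)
        calc PySem.Set.update t ((s ++ L).flatMap pvH)
            = PySem.Set.update (PySem.Set.update t (s.flatMap pvH)) (L.flatMap pvH) := by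
              rw [← pvUpdate_append]; simp
          _ = PySem.Set.update (PySem.Set.update (PySem.Set.update t (s.flatMap pvH)) (pvH x))
              (L.flatMap pvH) := by
              rw [pvUpdate_of_subset _ _ habs]
          _ = PySem.Set.update t ((s ++ x :: L).flatMap pvH) := by
              rw [← pvUpdate_append, ← pvUpdate_append]
              simp
      · rw [List.foldl_cons, PySem.Set.add_of_not_mem hx, ih (s ++ [x])]
        simp

-- ===== VERDICT (by name: the statement is the Claim_ definition above) =====
theorem get_computers_cleaned_py_spec : Claim_equal_get_computers_cleaned_py := by
  intro computers _
  show get_computers_cleaned_py computers = get_computers_cleaned_py_alt computers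
  unfold get_computers_cleaned_py
  rw [pvB_eq]
  simp only [pvPassA_eq]
  have h2 : ∀ (sl : PySem.Set String),
      sl.foldl (fun t computer => ((PySem.Str.split? computer " & ").getD []).foldl pvStepAnd t)
        PySem.Set.empty
      = PySem.Set.update PySem.Set.empty (sl.flatMap pvH) := by
    intro sl
    rw [show (fun (t : PySem.Set String) computer => ((PySem.Str.split? computer " & ").getD []).foldl pvStepAnd t)
        = (fun t a => PySem.Set.update t (pvH a)) from
      funext fun t => funext fun a => pvStepAndFold_eq t a]
    exact pvFoldl_update pvH sl PySem.Set.empty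
  rw [h2]
  have : PySem.Set.update PySem.Set.empty (pvStream computers)
      = (pvStream computers).foldl PySem.Set.add PySem.Set.empty := by
    simp [PySem.Set.update]
  rw [this]
  simpa using pvKey (pvStream computers) PySem.Set.empty PySem.Set.empty
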